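-- pv_equiv track=rewrite | github.com/pathforge-labs/pathforge | apps/api/app/core/query_recorder.py | derive_engine_name
-- ===== SOURCE A (Python) =====
-- DEFAULT_ENGINE_NAME = "unscoped"
--
-- _API_PREFIX_SEGMENTS = ("api", "v1")
--
-- def derive_engine_name(path: str) -> str:
--     """Return the principal engine label for a request path.
--
--     The label is the **first non-prefix segment** with hyphens
--     normalised to underscores.  ``/api/v1/career-dna/dashboard`` →
--     ``career_dna``, ``/api/v1/auth/login`` → ``auth``.  Paths shorter
--     than the prefix (e.g. ``/health/ready``) yield
--     :data:`DEFAULT_ENGINE_NAME`.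
--     """
--     segments = [seg for seg in path.split("/") if seg]
--     if not segments:
--         return DEFAULT_ENGINE_NAME
--
--     # Skip the API prefix if present.
--     if (
--         len(segments) >= len(_API_PREFIX_SEGMENTS)
--         and tuple(segments[: len(_API_PREFIX_SEGMENTS)]) == _API_PREFIX_SEGMENTS
--     ):
--         segments = segments[len(_API_PREFIX_SEGMENTS) :]
--     elif segments[0] == _API_PREFIX_SEGMENTS[0]:
--         # Forward-compat: tolerate ``/api/<engine>`` without the version
--         # segment, in case a future router mounts above v1.
--         segments = segments[1:]
--
--     if not segments:
--         return DEFAULT_ENGINE_NAME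
--
--     return segments[0].replace("-", "_")
-- ===== SOURCE B (Python) =====
-- DEFAULT_ENGINE_NAME = "unscoped"
--
-- _API_PREFIX_SEGMENTS = ("api", "v1")
--
--
-- def derive_engine_name(path: str) -> str:
--     """Single streaming pass: consume prefix segments as they appear,
--     return the first segment that is not the next expected prefix segment."""
--     p = 0
--     for seg in path.split("/"):
--         if not seg:
--             continue
--         if p < len(_API_PREFIX_SEGMENTS) and seg == _API_PREFIX_SEGMENTS[p]:
--             p += 1
--             continue
--         return seg.replace("-", "_")
--     return DEFAULT_ENGINE_NAME
-- ===== Notes on version B (the rewrite author's own statement) =====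
-- stated objective: simpler
-- what changed: Replaces A's build-a-filtered-list-then-two-branch-prefix-cascade-then-index with a single streaming pass over the raw split parts that skips empties, consumes prefix segments ('api', then 'v1') as they appear, and returns at the first non-prefix segment.
import Mathlib
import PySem

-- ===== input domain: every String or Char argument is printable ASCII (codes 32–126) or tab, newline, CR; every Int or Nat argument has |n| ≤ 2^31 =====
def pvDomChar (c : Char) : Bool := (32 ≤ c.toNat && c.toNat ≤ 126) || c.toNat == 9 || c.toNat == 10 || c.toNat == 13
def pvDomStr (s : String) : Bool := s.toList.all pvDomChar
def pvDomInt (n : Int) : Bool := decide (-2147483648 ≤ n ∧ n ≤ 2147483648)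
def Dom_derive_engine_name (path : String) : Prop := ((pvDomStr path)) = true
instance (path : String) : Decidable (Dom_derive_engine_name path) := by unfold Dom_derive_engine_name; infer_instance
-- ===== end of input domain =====

-- B replaces A's build-filter-then-two-branch-prefix-cascade with one streaming pass over the
-- split segments (skip empties, consume prefix segments as they appear, return at the first
-- non-prefix segment); objective: simpler.

-- ===== PORT A =====
-- A's body after the `segments = [...]` comprehension: the two-branch prefix cascade
def engineCascade (segments : List String) : String :=
  match segments with
  | [] => "unscoped"
  | s0 :: _ =>
    let segments2 :=
      if segments.length ≥ 2 ∧ segments.take 2 = ["api", "v1"] then segments.drop 2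
      else if s0 = "api" then segments.drop 1
      else segments
    match segments2 with
    | [] => "unscoped"
    | t0 :: _ => PySem.Str.replace t0 "-" "_"

def derive_engine_name (path : String) : String :=
  engineCascade (((PySem.Str.split? path "/").getD []).filter (fun seg => seg ≠ ""))

-- ===== PORT B =====
-- the for-loop of Source B: state p = number of prefix segments consumed so far
def engineLoop (p : Nat) : List String → String
  | [] => "unscoped"
  | seg :: rest =>
    if seg = "" then engineLoop p rest
    else if p < (["api", "v1"] : List String).length ∧ seg = (["api", "v1"] : List String).getD p "" then
      engineLoop (p + 1) rest
    else PySem.Str.replace seg "-" "_"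

def derive_engine_name_alt (path : String) : String :=
  engineLoop 0 ((PySem.Str.split? path "/").getD [])

-- ===== PRECONDITION & SPEC =====
def Spec_derive_engine_name (path : String) (out : String) : Prop := out = derive_engine_name_alt path
instance (path : String) (out : String) : Decidable (Spec_derive_engine_name path out) := by unfold Spec_derive_engine_name; infer_instance

-- ===== CLAIM (what is proved, stated in full; the proofs are below) =====
def Claim_equal_derive_engine_name : Prop := ∀ (path : String), Dom_derive_engine_name path → Spec_derive_engine_name path (derive_engine_name path)

-- ===== LEMMAS AND PROOFS =====

-- B's loop skips empty segments, so it may as well run on the filtered list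
theorem engineLoop_filter (l : List String) (p : Nat) :
    engineLoop p l = engineLoop p (l.filter (fun s => s ≠ "")) := by
  induction l generalizing p with
  | nil => rfl
  | cons s rest ih =>
    by_cases hs : s = ""
    · rw [List.filter_cons_of_neg (by simp [hs])]
      simp [engineLoop, hs, ih]
    · rw [List.filter_cons_of_pos (by simp [hs])]
      simp only [engineLoop, if_neg hs]
      split_ifs with h
      · exact ih (p + 1)
      · rfl

-- on a list of nonempty segments, A's prefix cascade equals B's streaming loop
theorem cascade_eq_loop (segs : List String) (hne : ∀ s ∈ segs, s ≠ "") :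
    engineCascade segs = engineLoop 0 segs := by
  unfold engineCascade
  match segs with
  | [] => rfl
  | a :: rest =>
    have ha : a ≠ "" := hne a (by simp)
    by_cases hapi : a = "api"
    · subst hapi
      match rest with
      | [] => simp [engineLoop]
      | b :: r2 =>
        have hb : b ≠ "" := hne b (by simp)
        by_cases hv1 : b = "v1"
        · subst hv1
          match r2 with
          | [] => simp [engineLoop]
          | c :: r3 =>
            have hc : c ≠ "" := hne c (by simp)
            simp [engineLoop, hc]
        · simp [engineLoop, hb, hv1]
    · simp [engineLoop, ha, hapi]

-- ===== VERDICT (by name: the statement is the Claim_ definition above) =====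
theorem derive_engine_name_spec : Claim_equal_derive_engine_name := by
  intro path _
  show _ = _
  unfold derive_engine_name derive_engine_name_alt
  rw [engineLoop_filter]
  refine cascade_eq_loop _ (fun s hs => ?_)
  simp only [List.mem_filter, decide_eq_true_eq] at hs
  exact hs.2
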